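-- pv_equiv track=rewrite | github.com/miquelLlorca/proyectosPython | JUEGOS/snake/auto_snake.py | mover
-- ===== SOURCE A (Python) =====
-- def mover(cola, vel):
--     for i in range(2):
--         if 15 <= cola[0][i] + vel[i] <= dimensiones[i] - 30:
--             for j in range(1,len(cola)):
--                 if cola[j][0] == cola[0][0] + vel[0]*15 and cola[j][1] == cola[0][1] + vel[1]*15:
--                     return False
--         else:
--             return False
--     return True
--
-- dimensiones = [705,705] #47 cuadrados de 15 px
-- ===== SOURCE B (Python) =====
-- dimensiones = [705, 705]  # 47 cuadrados de 15 px
--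
-- def mover(cola, vel):
--     # Guard each dimension's bounds explicitly (offset vel[i], as in A), no loops;
--     # then check the body for the next-head cell by structural recursion.
--     head = cola[0]
--     if not (15 <= head[0] + vel[0] <= dimensiones[0] - 30):
--         return False
--     if not (15 <= head[1] + vel[1] <= dimensiones[1] - 30):
--         return False
--     return _free(cola[1:], head[0] + vel[0] * 15, head[1] + vel[1] * 15)
--
-- def _free(body, nx, ny):
--     # recursively: True iff no body segment occupies the next-head cell
--     if not body:
--         return True
--     if body[0][0] == nx and body[0][1] == ny:
--         return False
--     return _free(body[1:], nx, ny)
-- ===== Notes on version B (the rewrite author's own statement) =====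
-- stated objective: simpler
-- what changed: A iterates range(2) and re-scans the whole body once per dimension inside that loop; B has no loops at all: two explicit per-dimension guard conditionals followed by a recursive helper that walks the body once looking for the next-head cell.
-- outside the precondition, e.g. on mover([[20, 20], [1]], [1, 1]): A returns True, B returns True
import Mathlib
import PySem

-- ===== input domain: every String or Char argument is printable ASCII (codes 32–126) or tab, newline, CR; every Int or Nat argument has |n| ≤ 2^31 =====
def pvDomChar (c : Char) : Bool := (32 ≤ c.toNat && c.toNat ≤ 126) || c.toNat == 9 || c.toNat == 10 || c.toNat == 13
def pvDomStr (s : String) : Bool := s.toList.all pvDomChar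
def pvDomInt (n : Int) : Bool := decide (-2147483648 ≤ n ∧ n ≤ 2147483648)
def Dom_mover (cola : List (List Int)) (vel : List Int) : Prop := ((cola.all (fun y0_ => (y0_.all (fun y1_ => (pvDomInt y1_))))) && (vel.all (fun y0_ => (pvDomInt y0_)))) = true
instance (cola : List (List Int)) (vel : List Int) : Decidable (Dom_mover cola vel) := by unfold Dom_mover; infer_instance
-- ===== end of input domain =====

-- B removes A's loops entirely: two explicit per-dimension bounds guards, then a recursive
-- walk of the body for the next-head cell (A rescans the body once per dimension); objective: simpler.

-- ===== PORT A =====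
def pvDimensiones : List Int := [705, 705]

def mover (cola : List (List Int)) (vel : List Int) : Bool :=
  ((PySem.List.pyRange 0 2 1).foldl
    (fun acc i =>
      match acc with
      | some r => some r
      | none =>
        if 15 ≤ PySem.List.pyGetD (PySem.List.pyGetD cola 0 []) i 0 + PySem.List.pyGetD vel i 0 ∧
           PySem.List.pyGetD (PySem.List.pyGetD cola 0 []) i 0 + PySem.List.pyGetD vel i 0 ≤
             PySem.List.pyGetD pvDimensiones i 0 - 30 then
          (PySem.List.pyRange 1 (cola.length : Int) 1).foldl
            (fun acc2 j =>
              match acc2 with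
              | some r => some r
              | none =>
                if PySem.List.pyGetD (PySem.List.pyGetD cola j []) 0 0 =
                     PySem.List.pyGetD (PySem.List.pyGetD cola 0 []) 0 0 + PySem.List.pyGetD vel 0 0 * 15 ∧
                   PySem.List.pyGetD (PySem.List.pyGetD cola j []) 1 0 =
                     PySem.List.pyGetD (PySem.List.pyGetD cola 0 []) 1 0 + PySem.List.pyGetD vel 1 0 * 15 then
                  some false
                else none)
            none
        else some false)
    none).getD true

-- ===== PORT B =====
-- recursive helper _free of Source B: True iff no body segment occupies (nx, ny)
def moverFree (body : List (List Int)) (nx ny : Int) : Bool :=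
  match body with
  | [] => true
  | seg :: rest =>
    if PySem.List.pyGetD seg 0 0 = nx ∧ PySem.List.pyGetD seg 1 0 = ny then false
    else moverFree rest nx ny

def mover_alt (cola : List (List Int)) (vel : List Int) : Bool :=
  let head := PySem.List.pyGetD cola 0 []
  if ¬(15 ≤ PySem.List.pyGetD head 0 0 + PySem.List.pyGetD vel 0 0 ∧
        PySem.List.pyGetD head 0 0 + PySem.List.pyGetD vel 0 0 ≤ PySem.List.pyGetD pvDimensiones 0 0 - 30) then
    false
  else if ¬(15 ≤ PySem.List.pyGetD head 1 0 + PySem.List.pyGetD vel 1 0 ∧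
        PySem.List.pyGetD head 1 0 + PySem.List.pyGetD vel 1 0 ≤ PySem.List.pyGetD pvDimensiones 1 0 - 30) then
    false
  else
    moverFree (PySem.List.slice cola (some 1) none)
      (PySem.List.pyGetD head 0 0 + PySem.List.pyGetD vel 0 0 * 15)
      (PySem.List.pyGetD head 1 0 + PySem.List.pyGetD vel 1 0 * 15)

-- ===== PRECONDITION & SPEC =====
-- Pre_ admits well-formed snakes (nonempty cola, every segment and vel with ≥ 2 coordinates) and,
-- in addition, any input whose first coordinate already fails the bounds check (both programs
-- return False there at once); the remaining excluded inputs are ones where A raises IndexError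
-- or returns only by accident of short-circuit evaluation over a malformed snake.
def Pre_mover (cola : List (List Int)) (vel : List Int) : Prop :=
  (cola ≠ [] ∧ (∀ r ∈ cola, 2 ≤ r.length) ∧ 2 ≤ vel.length) ∨
  (cola ≠ [] ∧ 1 ≤ cola.headI.length ∧ 1 ≤ vel.length ∧
    ¬(15 ≤ cola.headI.headI + vel.headI ∧ cola.headI.headI + vel.headI ≤ 675))
instance (cola : List (List Int)) (vel : List Int) : Decidable (Pre_mover cola vel) := by unfold Pre_mover; infer_instance

def pvWitness_mover : List (List Int) × List Int := ([[300, 300], [100, 100]], [1, 0])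

def Spec_mover (cola : List (List Int)) (vel : List Int) (out : Bool) : Prop := out = mover_alt cola vel
instance (cola : List (List Int)) (vel : List Int) (out : Bool) : Decidable (Spec_mover cola vel out) := by unfold Spec_mover; infer_instance

-- ===== CLAIM (what is proved, stated in full; the proofs are below) =====
def Claim_equal_mover : Prop := ∀ (cola : List (List Int)) (vel : List Int), Dom_mover cola vel → Pre_mover cola vel → Spec_mover cola vel (mover cola vel)

-- ===== LEMMAS AND PROOFS =====

-- A's inner early-return loop with an already-returned accumulator stays returned.
theorem pv_foldl_step_some {α : Type} (p : α → Prop) [DecidablePred p] (t : List α) (r : Bool) :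
    t.foldl (fun acc seg => match acc with
      | some b => some b
      | none => if p seg then some false else none) (some r) = some r := by
  induction t with
  | nil => rfl
  | cons x xs ih => simpa using ih

-- A's inner early-return loop from 'not returned yet' is 'any p'.
theorem pv_foldl_step_none {α : Type} (p : α → Prop) [DecidablePred p] (t : List α) :
    t.foldl (fun acc seg => match acc with
      | some b => some b
      | none => if p seg then some false else none) none
    = if t.any (fun seg => decide (p seg)) then some false else none := by
  induction t with
  | nil => rfl
  | cons x xs ih =>
    by_cases h : p x
    · simp [List.foldl_cons, h, pv_foldl_step_some]
    · simp [List.foldl_cons, h, ih]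

-- B's recursive body walk is 'no segment matches'.
theorem pv_moverFree_eq (body : List (List Int)) (nx ny : Int) :
    moverFree body nx ny
    = !(body.any (fun seg =>
        decide (PySem.List.pyGetD seg 0 0 = nx ∧ PySem.List.pyGetD seg 1 0 = ny))) := by
  induction body with
  | nil => rfl
  | cons x xs ih =>
    simp only [moverFree, List.any_cons, ih]
    by_cases h : PySem.List.pyGetD x 0 0 = nx ∧ PySem.List.pyGetD x 1 0 = ny
    · simp [h]
    · simp only [if_neg h]
      simp [h]

-- ===== VERDICT (by name: the statement is the Claim_ definition above) =====
theorem mover_spec : Claim_equal_mover := by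
  intro cola vel _ hpre
  rcases hpre with _ | ⟨hne, hh, hv, hb⟩
  case inr =>
    rcases cola with _ | ⟨h, t⟩
    · exact absurd rfl hne
    rcases vel with _ | ⟨v, vs⟩
    · simp at hv
    rcases h with _ | ⟨x, xs⟩
    · simp at hh
    simp only [List.headI] at hb
    unfold Spec_mover mover mover_alt
    rw [show PySem.List.pyRange 0 2 1 = [0, 1] from rfl]
    simp only [List.foldl_cons, List.foldl_nil]
    have h0 : PySem.List.pyGetD ((x :: xs) :: t) 0 [] = x :: xs := by
      simp [PySem.List.pyGetD, PySem.List.pyGet?, PySem.List.pyIdx?]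
    have h1 : PySem.List.pyGetD (v :: vs) 0 0 = v := by
      simp [PySem.List.pyGetD, PySem.List.pyGet?, PySem.List.pyIdx?]
    have h2 : PySem.List.pyGetD (x :: xs) 0 0 = x := by
      simp [PySem.List.pyGetD, PySem.List.pyGet?, PySem.List.pyIdx?]
    have hd : PySem.List.pyGetD pvDimensiones 0 0 = 705 := rfl
    have hb' : ¬(15 ≤ x + v ∧ x + v ≤ PySem.List.pyGetD pvDimensiones 0 0 - 30) := by
      rw [hd]; omega
    simp only [h0, h1, h2]
    rw [if_neg hb']
    simp only []
    rw [if_pos hb']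
    rfl
  case inl =>
    unfold Spec_mover mover mover_alt
    rw [show PySem.List.pyRange 0 2 1 = [0, 1] from rfl,
        PySem.List.slice_from cola (by norm_num)]
    rw [PySem.List.foldl_pyRange_pyGetD' cola ([] : List Int)
        (fun acc2 seg =>
          match acc2 with
          | some r => some r
          | none =>
            if PySem.List.pyGetD seg 0 0 =
                 PySem.List.pyGetD (PySem.List.pyGetD cola 0 []) 0 0 + PySem.List.pyGetD vel 0 0 * 15 ∧
               PySem.List.pyGetD seg 1 0 =
                 PySem.List.pyGetD (PySem.List.pyGetD cola 0 []) 1 0 + PySem.List.pyGetD vel 1 0 * 15 then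
              some false
            else none) none (by norm_num)]
    simp only [List.foldl_cons, List.foldl_nil]
    rw [pv_foldl_step_none, pv_moverFree_eq]
    split_ifs <;> simp_all
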